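-- pv_equiv track=rewrite | github.com/emmacwatts/PeptideCountingandTAG | PeptideCounting/theoreticalLabellingFunctions.py | potentialPeptides
-- ===== SOURCE A (Python) =====
-- def cutSiteSearchRegions(proteinSequence, cutsites = ['R', 'K']):
--     """
--     Determines search regions for peptides - proteinSequences cleaved to start at each possible cutsite.
--
--     params:
--         proteinSequence: the protein sequence of interest (str)
--         cutSites: list of amino acids at which the enzyme cuts (list of str)
--
--     returns:
--         searchRegions: proteinSequence cleaved to begin at each cutsite in the sequence (list of str)
--
--      """
--     #This will be a list of all cut sites in the sequence, with start 0. start sites of peptides will iterate through this list.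
--     cutSitePositions = []
--
--     #Iterate through the sequence and collect all cut site positions
--     for index, aa in enumerate(proteinSequence):
--         if aa in cutsites:
--             cutSitePositions.append(index)
--
--     searchRegions = [proteinSequence] #starting region will be the whole protein (starts at 0)
--     for cutSite in cutSitePositions:
--             searchRegions.append(proteinSequence[cutSite+1:]) #note that this is +1 as the cut peptide itself should be left of the cut site
--
--     return searchRegions
--
-- def potentialPeptides(proteinSequence, cutSites = ['R', 'K'], missedcleavagemax = 2):
--     """
--     Calculates all potential peptides for a protein sequence given the amino acids at which the enzyme cuts.
--
--     params:
--         proteinSequence: string of the protein sequenc of interest.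
--         cutSites: list of strings of amino acids at which the enzyme cuts. By default, this is set for trypsin.
--
--     output:
--         allPeptidesList: all potential peptides for the given inputs.
--     """
--     #Start list for the output - all potential peptides for this protein
--     allPeptidesList = []
--
--     #Counter for missed cleavages (allows for two)
--
--     searchRegions = cutSiteSearchRegions(proteinSequence, cutsites = cutSites)
--
--     #Iterate through the string and add potential peptides according to allowed missed cleavages.
--     for searchRegion in searchRegions:
--         peptideCount = 0
--         for index, aa in enumerate(searchRegion):
--         #If cut site is encountered, save sequence
--             if aa in cutSites:
--                 stopaa = index
--                 allPeptidesList.append(searchRegion[:stopaa+1]) #again to keep the cut protein on the left side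
--                 peptideCount +=1
--                 #Once we've accounted for two missed cleavages, stop iterating and move to the next start site
--                 if peptideCount == missedcleavagemax+1: #missed cleavage allowance +1 = expected number of peptides output
--                     break
--             elif index == len(searchRegion)-1:
--                 allPeptidesList.append(searchRegion[:index+1])
--                 break
--
--     #Remove peptides which are out of range from the full list
--     #allPeptidesList = inRangePeptideCalc(allPeptidesList, minSize = 5, maxSize = 10) hashed out for now as the min/max is nonsensical
--
--     allPeptidesLength = len(allPeptidesList)
--
--     return allPeptidesLength
-- ===== SOURCE B (Python) =====
-- def potentialPeptides(proteinSequence, cutSites=['R', 'K'], missedcleavagemax=2):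
--     """
--     Counts potential peptides directly, without materialising any peptide or search region:
--     each search region is a suffix of the protein, and its peptide count is a closed-form
--     function of the number of cut residues it contains. O(n) instead of O(n^2).
--     """
--     cs = frozenset(cutSites)
--     n = len(proteinSequence)
--     m = missedcleavagemax + 1
--     tail = 0 if (n > 0 and proteinSequence[n - 1] in cs) else 1
--     C = sum(1 for aa in proteinSequence if aa in cs)
--
--     def regionCount(c):
--         # peptides produced from a non-empty suffix region containing c cut residues
--         return m if 1 <= m <= c else c + tail
--
--     total = regionCount(C) if n > 0 else 0
--     seen = 0
--     for i, aa in enumerate(proteinSequence):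
--         if aa in cs:
--             seen += 1
--             if i + 1 < n:
--                 total += regionCount(C - seen)
--     return total
-- ===== Notes on version B (the rewrite author's own statement) =====
-- stated objective: faster
-- what changed: B never builds search regions or peptide strings: every region is a suffix of the protein, so one pass computes cut-residue counts and adds a closed-form peptide count per region (m if 1<=m<=c else c+tail).
import Mathlib
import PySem

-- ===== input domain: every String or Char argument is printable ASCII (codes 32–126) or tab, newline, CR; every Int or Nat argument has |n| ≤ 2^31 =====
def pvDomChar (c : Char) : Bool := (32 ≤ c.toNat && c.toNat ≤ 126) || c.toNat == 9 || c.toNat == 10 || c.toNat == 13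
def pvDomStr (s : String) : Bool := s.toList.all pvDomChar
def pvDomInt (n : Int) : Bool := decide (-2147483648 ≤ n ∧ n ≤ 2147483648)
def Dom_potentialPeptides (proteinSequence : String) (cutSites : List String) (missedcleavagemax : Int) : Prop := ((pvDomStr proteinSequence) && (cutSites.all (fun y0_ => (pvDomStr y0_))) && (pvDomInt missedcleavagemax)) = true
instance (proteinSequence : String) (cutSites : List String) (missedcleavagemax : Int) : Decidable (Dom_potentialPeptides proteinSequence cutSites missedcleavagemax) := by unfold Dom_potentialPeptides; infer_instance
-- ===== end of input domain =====

-- B counts peptides by a per-suffix closed form in one pass instead of building all regions and peptides (faster).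

-- ===== PORT A =====
-- shared helper: Python's membership test 'aa in cutSites' for a single character aa
def pvIsCut (cutSites : List String) (c : Char) : Bool := cutSites.contains (String.ofList [c])

-- cutSiteSearchRegions, working on the character list of the string
def cutSiteSearchRegionsA (seq : List Char) (cutsites : List String) : List (List Char) :=
  let cutSitePositions : List Int :=
    (PySem.List.enumerate seq).foldl
      (fun acc p => if pvIsCut cutsites p.2 then acc ++ [p.1] else acc) []
  cutSitePositions.foldl
    (fun acc cutSite => acc ++ [PySem.List.slice seq (some (cutSite + 1)) none]) [seq]

-- the inner 'for index, aa in enumerate(searchRegion)' loop with its two break points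
def pvInnerA (cutSites : List String) (mm : Int) (region : List Char) :
    List Char → Int → List (List Char) → Int → List (List Char)
  | [], _, acc, _ => acc
  | aa :: rest, index, acc, pc =>
    if pvIsCut cutSites aa then
      let acc' := acc ++ [PySem.List.slice region none (some (index + 1))]
      if pc + 1 = mm + 1 then acc'
      else pvInnerA cutSites mm region rest (index + 1) acc' (pc + 1)
    else if index = (region.length : Int) - 1 then
      acc ++ [PySem.List.slice region none (some (index + 1))]
    else pvInnerA cutSites mm region rest (index + 1) acc pc

def potentialPeptides (proteinSequence : String) (cutSites : List String) (missedcleavagemax : Int) : Int :=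
  let searchRegions := cutSiteSearchRegionsA proteinSequence.toList cutSites
  let allPeptidesList :=
    searchRegions.foldl (fun acc r => pvInnerA cutSites missedcleavagemax r r 0 acc 0)
      ([] : List (List Char))
  (allPeptidesList.length : Int)

-- ===== PORT B =====
-- peptides produced from a non-empty suffix region containing c cut residues
def pvRegionCount (m tail c : Int) : Int := if 1 ≤ m ∧ m ≤ c then m else c + tail

def potentialPeptides_alt (proteinSequence : String) (cutSites : List String) (missedcleavagemax : Int) : Int :=
  let seq := proteinSequence.toList
  let n : Int := (seq.length : Int)
  let m := missedcleavagemax + 1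
  let tail : Int := if seq.getLast?.any (fun c => pvIsCut cutSites c) then 0 else 1
  let C : Int := (seq.countP (pvIsCut cutSites) : Int)
  let total0 : Int := if 0 < n then pvRegionCount m tail C else 0
  let st := (PySem.List.enumerate seq).foldl
    (fun (st : Int × Int) p =>
      if pvIsCut cutSites p.2 then
        (if p.1 + 1 < n then st.1 + pvRegionCount m tail (C - (st.2 + 1)) else st.1, st.2 + 1)
      else st) (total0, 0)
  st.1

-- ===== PRECONDITION & SPEC =====
def Spec_potentialPeptides (proteinSequence : String) (cutSites : List String) (missedcleavagemax : Int) (out : Int) : Prop := out = potentialPeptides_alt proteinSequence cutSites missedcleavagemax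
instance (proteinSequence : String) (cutSites : List String) (missedcleavagemax : Int) (out : Int) : Decidable (Spec_potentialPeptides proteinSequence cutSites missedcleavagemax out) := by unfold Spec_potentialPeptides; infer_instance

-- ===== CLAIM (what is proved, stated in full; the proofs are below) =====
def Claim_equal_potentialPeptides : Prop := ∀ (proteinSequence : String) (cutSites : List String) (missedcleavagemax : Int), Dom_potentialPeptides proteinSequence cutSites missedcleavagemax → Spec_potentialPeptides proteinSequence cutSites missedcleavagemax (potentialPeptides proteinSequence cutSites missedcleavagemax)

-- ===== LEMMAS AND PROOFS =====

-- number of cut residues in a region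
def pvCnt (cs : List String) (t : List Char) : Int := (t.countP (pvIsCut cs) : Int)

-- 0 if the region ends in a cut residue, else 1 (0 for the empty region)
def pvLastTail (cs : List String) (t : List Char) : Int :=
  match t.getLast? with
  | none => 0
  | some c => if pvIsCut cs c then 0 else 1

-- closed-form number of peptides A's inner loop appends on region t, with remaining budget q
def pvF (cs : List String) (q : Int) (t : List Char) : Int :=
  if 1 ≤ q ∧ q ≤ pvCnt cs t then q else pvCnt cs t + pvLastTail cs t

-- sum of pvF over the regions that follow each cut residue of t
def pvT (cs : List String) (m : Int) : List Char → Int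
  | [] => 0
  | a :: t => (if pvIsCut cs a then pvF cs m t else 0) + pvT cs m t

lemma pvCnt_nil (cs : List String) : pvCnt cs [] = 0 := rfl

lemma pvCnt_cons (cs : List String) (a : Char) (t : List Char) :
    pvCnt cs (a :: t) = (if pvIsCut cs a then 1 else 0) + pvCnt cs t := by
  simp only [pvCnt, List.countP_cons]
  split_ifs <;> push_cast <;> ring

lemma pvCnt_nonneg (cs : List String) (t : List Char) : 0 ≤ pvCnt cs t :=
  Int.natCast_nonneg _

lemma pvLastTail_nil (cs : List String) : pvLastTail cs [] = 0 := rfl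

lemma pvLastTail_singleton (cs : List String) (a : Char) :
    pvLastTail cs [a] = if pvIsCut cs a then 0 else 1 := rfl

lemma pvF_nil (cs : List String) (q : Int) : pvF cs q [] = 0 := by
  simp only [pvF, pvCnt_nil, pvLastTail_nil]
  split_ifs <;> omega

lemma pvF_cons_cut_one (cs : List String) (a : Char) (t : List Char) (h : pvIsCut cs a = true) :
    pvF cs 1 (a :: t) = 1 := by
  have := pvCnt_nonneg cs t
  simp only [pvF, pvCnt_cons, h, if_true]
  split_ifs <;> omega

lemma pvF_cons_cut (cs : List String) (a : Char) (t : List Char) (q : Int)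
    (h : pvIsCut cs a = true) (hq : q ≠ 1) :
    pvF cs q (a :: t) = 1 + pvF cs (q - 1) t := by
  cases t with
  | nil =>
    simp only [pvF, pvCnt_cons, pvCnt_nil, h, if_true, pvLastTail_singleton, pvLastTail_nil]
    split_ifs <;> omega
  | cons b t' =>
    simp only [pvF, pvCnt_cons, h, if_true]
    have hlt : pvLastTail cs (a :: b :: t') = pvLastTail cs (b :: t') := by
      simp [pvLastTail, List.getLast?_cons_cons]
    rw [hlt]
    split_ifs <;> omega

lemma pvF_singleton_noncut (cs : List String) (a : Char) (q : Int) (h : ¬ pvIsCut cs a = true) :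
    pvF cs q [a] = 1 := by
  simp only [pvF, pvCnt_cons, pvCnt_nil, h, pvLastTail_singleton]
  split_ifs <;> omega

lemma pvF_cons_noncut (cs : List String) (a : Char) (t : List Char) (q : Int)
    (h : ¬ pvIsCut cs a = true) (ht : t ≠ []) :
    pvF cs q (a :: t) = pvF cs q t := by
  cases t with
  | nil => exact absurd rfl ht
  | cons b t' =>
    have hlt : pvLastTail cs (a :: b :: t') = pvLastTail cs (b :: t') := by
      simp [pvLastTail, List.getLast?_cons_cons]
    simp only [pvF, pvCnt_cons, h, hlt]
    norm_num

lemma getLast?_of_suffix {t seq : List Char} (h : t.IsSuffix seq) (hne : t ≠ []) :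
    t.getLast? = seq.getLast? := by
  obtain ⟨pre, rfl⟩ := h
  rw [List.getLast?_append]
  have hsome : t.getLast? ≠ none := by simpa [List.getLast?_eq_none_iff] using hne
  cases hg : t.getLast? with
  | none => exact absurd hg hsome
  | some c => simp

lemma pvTail_eq (cs : List String) {t seq : List Char} (h : t.IsSuffix seq) (hne : t ≠ []) :
    (if seq.getLast?.any (fun c => pvIsCut cs c) then (0 : Int) else 1) = pvLastTail cs t := by
  rw [← getLast?_of_suffix h hne]
  have hsome : t.getLast? ≠ none := by simpa [List.getLast?_eq_none_iff] using hne
  cases hg : t.getLast? with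
  | none => exact absurd hg hsome
  | some c => simp [pvLastTail, hg, Option.any]

-- A's inner loop appends exactly pvF-many peptides
lemma pvInnerA_len (cs : List String) (mm : Int) (r : List Char) :
    ∀ (rest : List Char) (k : Nat) (acc : List (List Char)) (pc : Int),
      rest = r.drop k →
      ((pvInnerA cs mm r rest (k : Int) acc pc).length : Int)
        = (acc.length : Int) + pvF cs (mm + 1 - pc) rest := by
  intro rest
  induction rest with
  | nil => intro k acc pc _; simp [pvInnerA, pvF_nil]
  | cons aa t ih =>
    intro k acc pc hk
    have ht : t = r.drop (k + 1) := by
      rw [← List.tail_drop, ← hk]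
      rfl
    have hlen : r.length = k + t.length + 1 := by
      have h2 := congrArg List.length hk
      simp only [List.length_cons, List.length_drop] at h2
      omega
    by_cases hc : pvIsCut cs aa
    · by_cases hb : pc + 1 = mm + 1
      · have hq : mm + 1 - pc = 1 := by omega
        simp only [pvInnerA, hc, if_true, hb, hq, pvF_cons_cut_one cs aa t hc]
        simp [List.length_append]
      · have hrec := ih (k + 1) (acc ++ [PySem.List.slice r none (some ((k : Int) + 1))]) (pc + 1) ht
        simp only [pvInnerA, hc, if_true, hb, if_false]
        push_cast at hrec ⊢
        rw [hrec]
        rw [pvF_cons_cut cs aa t (mm + 1 - pc) hc (by omega)]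
        simp only [List.length_append, List.length_cons, List.length_nil]
        push_cast
        ring_nf
    · by_cases hl : (k : Int) = (r.length : Int) - 1
      · have ht0 : t = [] := by
          have h0 : t.length = 0 := by omega
          exact List.length_eq_zero_iff.mp h0
        subst ht0
        simp only [pvInnerA, hc, hl, if_true, pvF_singleton_noncut cs aa _ hc]
        simp [List.length_append]
      · have htne : t ≠ [] := by
          intro h0
          apply hl
          subst h0
          simp only [List.length_nil] at hlen
          omega
        have hrec := ih (k + 1) acc pc ht
        simp only [pvInnerA, hc, if_false, hl]
        push_cast at hrec ⊢
        rw [hrec, pvF_cons_noncut cs aa t (mm + 1 - pc) hc htne]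

-- the regions are the whole sequence plus the suffix after each cut residue
lemma regions_eq (seq : List Char) (cs : List String) :
    cutSiteSearchRegionsA seq cs
      = seq :: (((PySem.List.enumerate seq).filter (fun p => pvIsCut cs p.2)).map
          (fun p => PySem.List.slice seq (some (p.1 + 1)) none)) := by
  unfold cutSiteSearchRegionsA
  rw [PySem.List.foldl_append_if (fun p : Int × Char => pvIsCut cs p.2) (fun p : Int × Char => p.1) (PySem.List.enumerate seq) []]
  rw [PySem.List.foldl_append_singleton_eq_map]
  simp [List.map_map, Function.comp]

-- folding the inner loop over a list of regions adds up the pvF values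
lemma foldl_regions_len (cs : List String) (mm : Int) :
    ∀ (rs : List (List Char)) (acc : List (List Char)),
      (((rs.foldl (fun acc r => pvInnerA cs mm r r 0 acc 0) acc).length : Int))
        = (acc.length : Int) + (rs.map (fun r => pvF cs (mm + 1) r)).sum := by
  intro rs
  induction rs with
  | nil => intro acc; simp
  | cons r rs ih =>
    intro acc
    simp only [List.foldl_cons, List.map_cons, List.sum_cons]
    rw [ih]
    have h0 := pvInnerA_len cs mm r r 0 acc 0 (by simp)
    push_cast at h0
    rw [h0]
    ring_nf

-- the mapped-region sum is pvT
lemma sum_regions_eq_pvT (seq : List Char) (cs : List String) (m : Int) :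
    ∀ (t : List Char) (s : Nat), t = seq.drop s →
      ((((PySem.List.enumerate t (s : Int)).filter (fun p => pvIsCut cs p.2)).map
          (fun p => pvF cs m (PySem.List.slice seq (some (p.1 + 1)) none))).sum)
        = pvT cs m t := by
  intro t
  induction t with
  | nil => intro s _; simp [pvT, PySem.List.enumerate_nil]
  | cons a t ih =>
    intro s hs
    have ht : t = seq.drop (s + 1) := by rw [← List.tail_drop, ← hs]; rfl
    have hslice : PySem.List.slice seq (some ((s : Int) + 1)) none = t := by
      have hcast : ((s : Int) + 1) = ((s + 1 : Nat) : Int) := by push_cast; ring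
      rw [hcast, PySem.List.slice_from_natCast, ← ht]
    have hcast : ((s : Int) + 1) = ((s + 1 : Nat) : Int) := by push_cast; ring
    rw [PySem.List.enumerate_cons]
    by_cases hc : pvIsCut cs a
    · simp only [List.filter_cons, hc, if_true, List.map_cons, List.sum_cons, pvT]
      rw [hslice, hcast, ih (s + 1) ht]
    · simp only [List.filter_cons, hc, Bool.false_eq_true, if_false, pvT]
      rw [hcast, ih (s + 1) ht]
      simp

-- A computes pvF seq + pvT seq
lemma potentialPeptides_eq (proteinSequence : String) (cs : List String) (mm : Int) :
    potentialPeptides proteinSequence cs mm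
      = pvF cs (mm + 1) proteinSequence.toList + pvT cs (mm + 1) proteinSequence.toList := by
  unfold potentialPeptides
  rw [regions_eq]
  rw [foldl_regions_len]
  simp only [List.map_cons, List.sum_cons, List.map_map, Function.comp_def]
  have h0 := sum_regions_eq_pvT proteinSequence.toList cs (mm + 1) proteinSequence.toList 0 (by simp)
  norm_num at h0
  rw [h0]
  simp

-- B's loop invariant
lemma pvB_loop (seq : List Char) (cs : List String) (m : Int) :
    ∀ (t : List Char) (s tot seen : Int),
      t.IsSuffix seq → s + (t.length : Int) = (seq.length : Int) →
      seen = (seq.countP (pvIsCut cs) : Int) - pvCnt cs t →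
      (((PySem.List.enumerate t s).foldl
        (fun (st : Int × Int) p =>
          if pvIsCut cs p.2 then
            (if p.1 + 1 < (seq.length : Int) then
              st.1 + pvRegionCount m (if seq.getLast?.any (fun c => pvIsCut cs c) then 0 else 1)
                ((seq.countP (pvIsCut cs) : Int) - (st.2 + 1))
             else st.1, st.2 + 1)
          else st) (tot, seen)).1)
        = tot + pvT cs m t := by
  intro t
  induction t with
  | nil => intro s tot seen _ _ _; simp [pvT, PySem.List.enumerate_nil]
  | cons a t ih =>
    intro s tot seen hsuf hs hseen
    have hsuf' : t.IsSuffix seq := (List.suffix_cons a t).trans hsuf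
    rw [PySem.List.enumerate_cons, List.foldl_cons]
    by_cases hc : pvIsCut cs a
    · simp only [hc, if_true]
      have hcc := pvCnt_cons cs a t
      rw [hc] at hcc
      simp only [if_true] at hcc
      have hseen' : seen + 1 = (seq.countP (pvIsCut cs) : Int) - pvCnt cs t := by omega
      cases t with
      | nil =>
        have hs1 : ¬ (s + 1 < (seq.length : Int)) := by
          simp only [List.length_cons, List.length_nil] at hs
          omega
        simp only [hs1, if_false]
        rw [ih (s + 1) tot (seen + 1) hsuf' (by simp only [List.length_cons, List.length_nil] at hs ⊢; omega) (by simpa using hseen')]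
        simp [pvT, pvF_nil, hc]
      | cons b t' =>
        have hs1 : s + 1 < (seq.length : Int) := by
          simp only [List.length_cons] at hs
          have : (0 : Int) ≤ ((b :: t').length : Int) - 1 := by simp
          simp only [List.length_cons] at this ⊢
          omega
        simp only [hs1, if_true]
        have harg : (seq.countP (pvIsCut cs) : Int) - (seen + 1) = pvCnt cs (b :: t') := by omega
        have hrc : pvRegionCount m (if seq.getLast?.any (fun c => pvIsCut cs c) then 0 else 1)
            ((seq.countP (pvIsCut cs) : Int) - (seen + 1)) = pvF cs m (b :: t') := by
          rw [harg]
          unfold pvRegionCount pvF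
          rw [pvTail_eq cs hsuf' (by simp)]
        rw [ih (s + 1) (tot + pvRegionCount m (if seq.getLast?.any (fun c => pvIsCut cs c) then 0 else 1) ((seq.countP (pvIsCut cs) : Int) - (seen + 1))) (seen + 1) hsuf' (by simp only [List.length_cons] at hs ⊢; omega) hseen']
        rw [hrc]
        simp only [pvT, hc, if_true]
        omega
    · simp only [hc, Bool.false_eq_true, if_false]
      have hcc := pvCnt_cons cs a t
      simp only [hc, Bool.false_eq_true, if_false, zero_add] at hcc
      have hseen' : seen = (seq.countP (pvIsCut cs) : Int) - pvCnt cs t := by omega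
      rw [ih (s + 1) tot seen hsuf' (by simp only [List.length_cons] at hs ⊢; omega) hseen']
      simp [pvT, hc]

-- B computes pvF seq + pvT seq
lemma potentialPeptides_alt_eq (proteinSequence : String) (cs : List String) (mm : Int) :
    potentialPeptides_alt proteinSequence cs mm
      = pvF cs (mm + 1) proteinSequence.toList + pvT cs (mm + 1) proteinSequence.toList := by
  unfold potentialPeptides_alt
  simp only []
  have hloop := pvB_loop proteinSequence.toList cs (mm + 1) proteinSequence.toList 0
    (if 0 < (proteinSequence.toList.length : Int) then
      pvRegionCount (mm + 1)
        (if proteinSequence.toList.getLast?.any (fun c => pvIsCut cs c) then 0 else 1)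
        ((proteinSequence.toList.countP (pvIsCut cs) : Int))
     else 0) 0 (List.suffix_refl _) (by omega) (by simp [pvCnt])
  rw [hloop]
  by_cases hne : proteinSequence.toList = []
  · rw [hne]
    simp [pvF_nil, pvT]
  · have hpos : (0 : Int) < (proteinSequence.toList.length : Int) := by
      have h1 : 0 < proteinSequence.toList.length := List.length_pos_iff.mpr hne
      omega
    rw [if_pos hpos]
    have hrc : pvRegionCount (mm + 1)
        (if proteinSequence.toList.getLast?.any (fun c => pvIsCut cs c) then 0 else 1)
        ((proteinSequence.toList.countP (pvIsCut cs) : Int))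
        = pvF cs (mm + 1) proteinSequence.toList := by
      unfold pvRegionCount pvF
      rw [pvTail_eq cs (List.suffix_refl _) hne]
      simp [pvCnt]
    rw [hrc]

-- ===== VERDICT (by name: the statement is the Claim_ definition above) =====
theorem potentialPeptides_spec : Claim_equal_potentialPeptides := by
  intro s cs mm _
  unfold Spec_potentialPeptides
  rw [potentialPeptides_eq, potentialPeptides_alt_eq]
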